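-- pv_equiv track=rewrite | github.com/priyanshsaxena24/Algo_Visualizer | app.py | insertion_sort_with_steps
-- ===== SOURCE A (Python) =====
-- def insertion_sort_with_steps(arr):
--     steps = []
--     for i in range(1, len(arr)):
--         key = arr[i]
--         j = i - 1
--         while j >= 0 and key < arr[j]:
--             arr[j + 1] = arr[j]
--             j -= 1
--         arr[j + 1] = key
--         steps.append(arr[:])  # Capture current state
--     return arr, steps
-- ===== SOURCE B (Python) =====
-- def insertion_sort_with_steps(arr):
--     # Each snapshot of A's insertion sort is "sorted prefix + untouched suffix":
--     # build the snapshots directly with the library sort, then splice the final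
--     # state back into arr (same in-place mutation as A).
--     steps = [sorted(arr[:i + 1]) + arr[i + 1:] for i in range(1, len(arr))]
--     if steps:
--         arr[:] = steps[-1]
--     return arr, steps
-- ===== Notes on version B (the rewrite author's own statement) =====
-- stated objective: idiomatic
-- what changed: B replaces the manual backward-shifting insertion loop with a list comprehension that builds each snapshot as sorted(prefix)+suffix via the built-in sorted, then splices the last snapshot back into arr.
import Mathlib
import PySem

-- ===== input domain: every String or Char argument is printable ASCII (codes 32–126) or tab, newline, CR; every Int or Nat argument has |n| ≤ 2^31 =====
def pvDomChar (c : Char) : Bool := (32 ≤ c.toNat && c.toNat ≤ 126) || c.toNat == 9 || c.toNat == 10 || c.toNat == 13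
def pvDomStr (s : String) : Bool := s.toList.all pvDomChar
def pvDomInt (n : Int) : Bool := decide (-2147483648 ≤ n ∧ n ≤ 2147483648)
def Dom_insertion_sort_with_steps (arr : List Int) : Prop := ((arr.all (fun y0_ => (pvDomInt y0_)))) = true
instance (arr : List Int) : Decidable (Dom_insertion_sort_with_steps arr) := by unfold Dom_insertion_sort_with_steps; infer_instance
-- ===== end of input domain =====

-- B replaces A's manual backward-shifting insertion loop by building each snapshot as
-- sorted(prefix)+suffix with the library sort (objective: idiomatic, not faster).
-- A mutates arr in place; B performs the same final mutation (arr[:] = last snapshot);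
-- the theorems below are about the RETURN value.

-- ===== PORT A =====
-- inner while loop of A; jn = j + 1 (so the Python loop guard j >= 0 is jn ≥ 1).
-- arr[j] is always in range here (0 ≤ j < len(arr)), so getD is exact.
def pvInnerA (key : Int) : List Int → Nat → List Int
  | l, 0 => l.set 0 key                                  -- arr[j+1] = key at j = -1
  | l, j + 1 =>
      if key < l.getD j 0
      then pvInnerA key (l.set (j + 1) (l.getD j 0)) j   -- arr[j+1] = arr[j]; j -= 1
      else l.set (j + 1) key                             -- arr[j+1] = key

-- one iteration of A's outer for-loop: key = arr[i] (always in range, getD exact),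
-- run the while loop, then steps.append(arr[:])
def pvStepA (st : List Int × List (List Int)) (i : Int) : List Int × List (List Int) :=
  let key := PySem.List.pyGetD st.1 i 0
  let l' := pvInnerA key st.1 i.toNat
  (l', st.2 ++ [l'])

def insertion_sort_with_steps (arr : List Int) : List Int × List (List Int) :=
  (PySem.List.pyRange 1 (arr.length : Int) 1).foldl pvStepA (arr, [])

-- ===== PORT B =====
-- steps = [sorted(arr[:i+1]) + arr[i+1:] for i in range(1, len(arr))]; slices with
-- nonnegative i are take/drop exactly. Then: if steps: arr[:] = steps[-1]; return arr, steps.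
def insertion_sort_with_steps_alt (arr : List Int) : List Int × List (List Int) :=
  let steps := (PySem.List.pyRange 1 (arr.length : Int) 1).map
      (fun i => PySem.List.sorted (arr.take (i.toNat + 1)) (fun x => x) false
                ++ arr.drop (i.toNat + 1))
  let final := match steps.getLast? with
    | some l => l
    | none => arr
  (final, steps)

-- ===== PRECONDITION & SPEC =====
def Spec_insertion_sort_with_steps (arr : List Int) (out : List Int × List (List Int)) : Prop := out = insertion_sort_with_steps_alt arr
instance (arr : List Int) (out : List Int × List (List Int)) : Decidable (Spec_insertion_sort_with_steps arr out) := by unfold Spec_insertion_sort_with_steps; infer_instance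

-- ===== CLAIM (what is proved, stated in full; the proofs are below) =====
def Claim_equal_insertion_sort_with_steps : Prop := ∀ (arr : List Int), Dom_insertion_sort_with_steps arr → Spec_insertion_sort_with_steps arr (insertion_sort_with_steps arr)

-- ===== LEMMAS AND PROOFS =====

-- ordered insert from the right (what A's shifting loop computes), via the reverse
def pvInsRev (key : Int) : List Int → List Int
  | [] => [key]
  | a :: t => if key < a then a :: pvInsRev key t else key :: a :: t

def pvInsR (key : Int) (s : List Int) : List Int := (pvInsRev key s.reverse).reverse

theorem pvInnerA_eq_insR (key : Int) (s : List Int) :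
    ∀ (x : Int) (r : List Int), pvInnerA key (s ++ x :: r) s.length = pvInsR key s ++ r := by
  induction s using List.reverseRecOn with
  | nil => intro x r; simp [pvInnerA, pvInsR, pvInsRev]
  | append_singleton s' a ih =>
      intro x r
      have hlen : (s' ++ [a]).length = s'.length + 1 := by simp
      rw [hlen]
      have hget : ((s' ++ [a]) ++ x :: r).getD s'.length 0 = a := by
        simp [List.getD]
      have hset : ∀ y : Int, ((s' ++ [a]) ++ x :: r).set (s'.length + 1) y
          = (s' ++ [a]) ++ y :: r := by
        intro y
        rw [List.append_assoc, List.set_append_right _ _ (by simp)]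
        simp
      simp only [pvInnerA, hget]
      by_cases h : key < a
      · rw [if_pos h, hset a]
        have e : s' ++ [a] ++ a :: r = s' ++ a :: (a :: r) := by simp
        rw [e, ih a (a :: r)]
        simp [pvInsR, pvInsRev, h]
      · rw [if_neg h, hset key]
        simp [pvInsR, pvInsRev, h]

theorem pvInsRev_perm (key : Int) (t : List Int) : (pvInsRev key t).Perm (key :: t) := by
  induction t with
  | nil => simp [pvInsRev]
  | cons a t ih =>
      simp only [pvInsRev]
      by_cases h : key < a
      · rw [if_pos h]
        exact (ih.cons a).trans (List.Perm.swap key a t)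
      · rw [if_neg h]

theorem pvInsR_perm (key : Int) (s : List Int) : (pvInsR key s).Perm (key :: s) := by
  unfold pvInsR
  exact ((List.reverse_perm _).trans (pvInsRev_perm key s.reverse)).trans
    ((List.reverse_perm s).cons key)

theorem pvInsRev_pairwise (key : Int) (t : List Int)
    (h : t.Pairwise (fun a b => b ≤ a)) :
    (pvInsRev key t).Pairwise (fun a b => b ≤ a) := by
  induction t with
  | nil => simp [pvInsRev]
  | cons a t ih =>
      rcases List.pairwise_cons.mp h with ⟨ha, ht⟩
      simp only [pvInsRev]
      by_cases hk : key < a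
      · rw [if_pos hk]
        refine List.pairwise_cons.mpr ⟨?_, ih ht⟩
        intro y hy
        rcases List.mem_cons.mp ((pvInsRev_perm key t).mem_iff.mp hy) with h2 | h2
        · omega
        · exact ha y h2
      · rw [if_neg hk]
        refine List.pairwise_cons.mpr ⟨?_, h⟩
        intro y hy
        rcases List.mem_cons.mp hy with h2 | h2
        · omega
        · exact le_trans (ha y h2) ((Int.not_lt).mp hk)

theorem pvInsR_pairwise (key : Int) (s : List Int)
    (h : s.Pairwise (· ≤ ·)) : (pvInsR key s).Pairwise (· ≤ ·) := by
  unfold pvInsR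
  rw [List.pairwise_reverse]
  exact pvInsRev_pairwise key s.reverse (by rwa [List.pairwise_reverse])

-- the sorted-prefix-plus-suffix snapshot after A has processed indices 1..k-1
def pvSnap (arr : List Int) (k : Nat) : List Int :=
  PySem.List.sorted (arr.take k) (fun x => x) false ++ arr.drop k

theorem pvInsR_sorted_step (arr : List Int) (k : Nat) (hk : k < arr.length) :
    pvInsR arr[k] (PySem.List.sorted (arr.take k) (fun x => x) false)
      = PySem.List.sorted (arr.take (k + 1)) (fun x => x) false := by
  symm
  apply PySem.List.sorted_id_eq_of_perm_of_pairwise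
  · have h1 : (pvInsR arr[k] (PySem.List.sorted (arr.take k) (fun x => x) false)).Perm
        (arr[k] :: arr.take k) :=
      (pvInsR_perm _ _).trans ((PySem.List.sorted_perm _ _ _).cons _)
    have h2 : (arr[k] :: arr.take k).Perm (arr.take k ++ [arr[k]]) :=
      (List.perm_append_singleton _ _).symm
    have h3 : arr.take k ++ [arr[k]] = arr.take (k + 1) := List.take_concat_get' arr k hk
    exact h3 ▸ (h1.trans h2)
  · exact pvInsR_pairwise _ _ (PySem.List.sorted_pairwise _ _)

theorem pvInvariant (arr : List Int) (k : Nat) (hk1 : 1 ≤ k) (hkn : k ≤ arr.length) :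
    (PySem.List.pyRange 1 (k : Int) 1).foldl pvStepA (arr, [])
      = (pvSnap arr k, (List.range (k - 1)).map (fun m => pvSnap arr (m + 2))) := by
  induction k with
  | zero => omega
  | succ k ih =>
      rcases Nat.lt_or_ge k 1 with hk0 | hk1'
      · -- k = 0 : base case, range(1,1) is empty
        have hk' : k = 0 := by omega
        subst hk'
        rw [show ((1:Nat) : Int) = 1 by norm_num, PySem.List.pyRange_one_eq_nil (by norm_num)]
        simp only [List.foldl_nil]
        have hne : arr ≠ [] := by
          intro h; rw [h] at hkn; simp at hkn
        obtain ⟨a, t, rfl⟩ := List.exists_cons_of_ne_nil hne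
        simp [pvSnap, PySem.List.sorted_eq_self_of_pairwise]
      · have hkn' : k < arr.length := by omega
        have hsplit : PySem.List.pyRange 1 ((k + 1 : Nat) : Int) 1
            = PySem.List.pyRange 1 (k : Int) 1 ++ [(k : Int)] := by
          have hle : (1 : Int) ≤ (k : Int) := by omega
          have := PySem.List.pyRange_one_succ_right (a := 1) (b := (k : Int)) hle
          push_cast
          rw [← this]
        rw [hsplit, List.foldl_append, ih hk1' (by omega)]
        simp only [List.foldl_cons, List.foldl_nil]
        -- evaluate pvStepA (pvSnap arr k, …) k
        have hlen : (PySem.List.sorted (arr.take k) (fun x => x) false).length = k := by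
          rw [PySem.List.length_sorted, List.length_take]; omega
        have hdrop : arr.drop k = arr[k] :: arr.drop (k + 1) :=
          List.drop_eq_getElem_cons hkn'
        have hkey : PySem.List.pyGetD (pvSnap arr k) (k : Int) 0 = arr[k] := by
          rw [PySem.List.pyGetD_natCast]
          unfold pvSnap
          rw [hdrop]
          simp [List.getD_eq_getElem?_getD, List.getElem?_append_right, hlen,
            List.getElem?_eq_getElem hkn']
        have hinner : pvInnerA arr[k] (pvSnap arr k) k = pvSnap arr (k + 1) := by
          unfold pvSnap
          rw [hdrop]
          have := pvInnerA_eq_insR arr[k]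
            (PySem.List.sorted (arr.take k) (fun x => x) false) arr[k] (arr.drop (k + 1))
          rw [hlen] at this
          rw [this, pvInsR_sorted_step arr k hkn']
        show pvStepA (pvSnap arr k, (List.range (k - 1)).map (fun m => pvSnap arr (m + 2))) (k : Int)
            = _
        unfold pvStepA
        simp only [hkey, Int.toNat_natCast, hinner]
        have hrange : List.range (k + 1 - 1) = List.range (k - 1) ++ [k - 1] := by
          rw [show k + 1 - 1 = (k - 1) + 1 by omega, List.range_succ]
        rw [hrange]
        simp only [List.map_append, List.map_cons, List.map_nil]
        have : k - 1 + 2 = k + 1 := by omega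
        rw [this]

-- ===== VERDICT (by name: the statement is the Claim_ definition above) =====
theorem insertion_sort_with_steps_spec : Claim_equal_insertion_sort_with_steps := by
  intro arr _
  unfold Spec_insertion_sort_with_steps insertion_sort_with_steps insertion_sort_with_steps_alt
  rcases Nat.lt_or_ge arr.length 1 with h0 | h1
  · -- empty list
    have : arr = [] := by cases arr <;> simp_all
    subst this
    simp [PySem.List.pyRange_one_eq_nil]
  · rw [pvInvariant arr arr.length h1 le_rfl]
    -- rewrite B's map over pyRange into a map over List.range
    have hB : (PySem.List.pyRange 1 (arr.length : Int) 1).map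
        (fun i => PySem.List.sorted (arr.take (i.toNat + 1)) (fun x => x) false
                  ++ arr.drop (i.toNat + 1))
        = (List.range (arr.length - 1)).map (fun m => pvSnap arr (m + 2)) := by
      rw [PySem.List.pyRange_one 1 (arr.length : Int), List.map_map]
      have hcast : ((arr.length : Int) - 1).toNat = arr.length - 1 := by omega
      rw [hcast]
      apply List.map_congr_left
      intro m _
      simp only [Function.comp_apply, pvSnap]
      have : ((1 : Int) + (m : Int)).toNat + 1 = m + 2 := by omega
      rw [this]
    rw [hB]
    -- the final list: last snapshot, or arr itself when there are no steps
    rcases Nat.lt_or_ge arr.length 2 with h2 | h2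
    · -- length 1: no steps
      have : arr.length - 1 = 0 := by omega
      rw [this]
      simp only [List.range_zero, List.map_nil, List.getLast?_nil]
      have hl1 : arr.length = 1 := by omega
      have : pvSnap arr arr.length = arr := by
        cases arr with
        | nil => simp at hl1
        | cons a t =>
          have ht : t = [] := List.length_eq_zero_iff.mp (by simpa using hl1)
          subst ht
          simp [pvSnap, PySem.List.sorted_eq_self_of_pairwise]
      rw [this]
    · -- length ≥ 2: final = last snapshot = pvSnap arr arr.length
      have hr : List.range (arr.length - 1) = List.range (arr.length - 2) ++ [arr.length - 2] := by
        rw [show arr.length - 1 = (arr.length - 2) + 1 by omega, List.range_succ]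
      rw [hr]
      have h4 : arr.length - 2 + 2 = arr.length := by omega
      simp only [List.map_append, List.map_cons, List.map_nil, h4]
      simp
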